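-- pv_equiv track=rewrite | github.com/OneLastChick/Start | phpstudy/15.py | reverse_referer
-- ===== SOURCE A (Python) =====
-- def is_consonant(letter):
--     # 把字母转换为小写
--     letter = letter.lower()
--     # 如果字母不是元音字母，也不是非拉丁字母，那么就是辅音字母
--     if letter not in "aeiou" and letter.isalpha():
--         return True
--     else:
--         return False
--
-- def reverse_referer(word):
--     # 初始化一个空字符串，用来存储还原后的单词
--     new_word = ""
--     # 初始化一个空集合，用来存储已经出现过的辅音字母
--     seen_consonants = set()
--     # 遍历单词中的每个字母
--     for letter in word:
--         # 如果字母是辅音字母，且没有在集合中出现过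
--         if is_consonant(letter) and letter.lower() not in seen_consonants:
--             # 那么就把它加入到新单词中
--             new_word += letter
--             # 并把它加入到集合中，表示已经出现过
--             seen_consonants.add(letter.lower())
--         # 如果字母不是辅音字母
--         elif not is_consonant(letter):
--             # 那么就把它加入到新单词中
--             new_word += letter
--             # 并清空集合，表示重新开始计算辅音字母的出现次数
--             seen_consonants.clear()
--     # 返回还原后的单词
--     return new_word
-- ===== SOURCE B (Python) =====
-- def is_consonant(letter):
--     letter = letter.lower()
--     if letter not in "aeiou" and letter.isalpha():
--         return True
--     else:
--         return False
--
-- def reverse_referer(word):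
--     # run-based: split the word into maximal runs of equal is_consonant value;
--     # consonant runs are deduped (by lowercase, keeping the first occurrence),
--     # other runs pass through unchanged.
--     pieces = []
--     i, n = 0, len(word)
--     while i < n:
--         k = is_consonant(word[i])
--         j = i
--         while j < n and is_consonant(word[j]) == k:
--             j += 1
--         run = word[i:j]
--         if k:
--             seen = set()
--             for c in run:
--                 l = c.lower()
--                 if l not in seen:
--                     pieces.append(c)
--                     seen.add(l)
--         else:
--             pieces.append(run)
--         i = j
--     return "".join(pieces)
-- ===== Notes on version B (the rewrite author's own statement) =====
-- stated objective: alternative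
-- what changed: B splits the word into maximal runs of same is_consonant value and dedups each consonant run with a fresh set (joining pieces at the end), instead of A's single character loop threading one seen-set that is cleared on every non-consonant.
import Mathlib
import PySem

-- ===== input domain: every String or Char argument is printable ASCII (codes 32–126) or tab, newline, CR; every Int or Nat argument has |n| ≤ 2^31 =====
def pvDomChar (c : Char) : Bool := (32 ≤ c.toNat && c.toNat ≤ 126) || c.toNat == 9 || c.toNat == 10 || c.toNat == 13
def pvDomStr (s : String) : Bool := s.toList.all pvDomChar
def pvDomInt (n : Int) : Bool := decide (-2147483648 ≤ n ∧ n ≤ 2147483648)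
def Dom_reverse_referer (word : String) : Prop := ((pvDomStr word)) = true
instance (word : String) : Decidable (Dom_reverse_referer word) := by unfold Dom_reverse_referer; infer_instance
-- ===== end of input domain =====

-- B re-decomposes A's single stateful character loop into per-run processing (dedup each
-- maximal consonant run with a fresh set, pass other runs through); alternative structure, same cost.

-- ===== PORT A =====
def is_consonant (letter : Char) : Bool :=
  -- letter = letter.lower(); return letter not in "aeiou" and letter.isalpha()
  let l := PySem.Chars.lowerChar letter
  (!("aeiou".toList.contains l)) && PySem.Chars.isalpha l

def reverse_referer (word : String) : String :=
  -- for letter in word: threading the state (new_word, seen_consonants)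
  String.ofList
    (word.toList.foldl
      (fun (st : List Char × PySem.Set Char) (letter : Char) =>
        if is_consonant letter && !(PySem.Set.contains st.2 (PySem.Chars.lowerChar letter)) then
          (st.1 ++ [letter], PySem.Set.add st.2 (PySem.Chars.lowerChar letter))
        else if !(is_consonant letter) then
          (st.1 ++ [letter], PySem.Set.empty)
        else st)
      ([], PySem.Set.empty)).1

-- ===== PORT B =====
-- inner 'for c in run' loop of Source B (dedup by lowercase, keep first occurrence)
def dedupRun : List Char → PySem.Set Char → List Char
  | [], _ => []
  | c :: t, seen =>
    let l := PySem.Chars.lowerChar c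
    if PySem.Set.contains seen l then dedupRun t seen
    else c :: dedupRun t (PySem.Set.add seen l)

-- outer while loop of Source B: peel off one maximal run of equal is_consonant value
def runsGo : List Char → List Char
  | [] => []
  | c :: t =>
    let k := is_consonant c
    let run := (c :: t).takeWhile (fun x => is_consonant x == k)
    let rest := (c :: t).dropWhile (fun x => is_consonant x == k)
    (if k then dedupRun run PySem.Set.empty else run) ++ runsGo rest
termination_by l => l.length
decreasing_by
  simp [List.dropWhile]
  exact List.length_dropWhile_le _ _

def reverse_referer_alt (word : String) : String := String.ofList (runsGo word.toList)

-- ===== PRECONDITION & SPEC =====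
def Spec_reverse_referer (word : String) (out : String) : Prop := out = reverse_referer_alt word
instance (word : String) (out : String) : Decidable (Spec_reverse_referer word out) := by unfold Spec_reverse_referer; infer_instance

-- ===== CLAIM (what is proved, stated in full; the proofs are below) =====
def Claim_equal_reverse_referer : Prop := ∀ (word : String), Dom_reverse_referer word → Spec_reverse_referer word (reverse_referer word)

-- ===== LEMMAS AND PROOFS =====

-- recursive form of A's loop body (proof helper)
def aGo : List Char → PySem.Set Char → List Char
  | [], _ => []
  | c :: t, s =>
    if is_consonant c && !(PySem.Set.contains s (PySem.Chars.lowerChar c)) then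
      c :: aGo t (PySem.Set.add s (PySem.Chars.lowerChar c))
    else if !(is_consonant c) then
      c :: aGo t PySem.Set.empty
    else
      aGo t s

theorem foldl_eq_aGo (l : List Char) (acc : List Char) (s : PySem.Set Char) :
    (l.foldl
      (fun (st : List Char × PySem.Set Char) (letter : Char) =>
        if is_consonant letter && !(PySem.Set.contains st.2 (PySem.Chars.lowerChar letter)) then
          (st.1 ++ [letter], PySem.Set.add st.2 (PySem.Chars.lowerChar letter))
        else if !(is_consonant letter) then
          (st.1 ++ [letter], PySem.Set.empty)
        else st)
      (acc, s)).1 = acc ++ aGo l s := by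
  induction l generalizing acc s with
  | nil => simp [aGo]
  | cons c t ih =>
    simp only [List.foldl_cons, aGo]
    by_cases h1 : (is_consonant c && !(PySem.Set.contains s (PySem.Chars.lowerChar c))) = true
    · rw [if_pos h1, if_pos h1, ih]
      simp
    · rw [if_neg h1, if_neg h1]
      by_cases h2 : (!(is_consonant c)) = true
      · rw [if_pos h2, if_pos h2, ih]
        simp
      · rw [if_neg h2, if_neg h2, ih]

-- the seen-set is irrelevant when the next character is not a consonant
theorem aGo_clear (c : Char) (t : List Char) (s s' : PySem.Set Char)
    (h : is_consonant c = false) : aGo (c :: t) s = aGo (c :: t) s' := by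
  simp [aGo, h]

-- A's loop over a consonant run is B's per-run dedup
theorem aGo_cons_run (run : List Char) :
    ∀ rest s, (∀ x ∈ run, is_consonant x = true) →
    ∃ s', aGo (run ++ rest) s = dedupRun run s ++ aGo rest s' := by
  induction run with
  | nil => intro rest s _; exact ⟨s, by simp [dedupRun]⟩
  | cons c t ih =>
    intro rest s hall
    have hc : is_consonant c = true := hall c (by simp)
    have ht : ∀ x ∈ t, is_consonant x = true := fun x hx => hall x (by simp [hx])
    by_cases hm : PySem.Chars.lowerChar c ∈ s
    · obtain ⟨s', hs'⟩ := ih rest s ht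
      exact ⟨s', by simp [aGo, dedupRun, hc, hm, hs']⟩
    · obtain ⟨s', hs'⟩ := ih rest (PySem.Set.add s (PySem.Chars.lowerChar c)) ht
      refine ⟨s', ?_⟩
      simp [PySem.Set.add, hm] at hs'
      simp [aGo, dedupRun, hc, hm, hs']

-- A's loop over a nonempty non-consonant run copies it and ends with an empty seen-set
theorem aGo_noncons_run (run : List Char) :
    ∀ rest s, run ≠ [] → (∀ x ∈ run, is_consonant x = false) →
    aGo (run ++ rest) s = run ++ aGo rest PySem.Set.empty := by
  induction run with
  | nil => intro _ _ h; exact absurd rfl h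
  | cons c t ih =>
    intro rest s _ hall
    have hc : is_consonant c = false := hall c (by simp)
    have ht : ∀ x ∈ t, is_consonant x = false := fun x hx => hall x (by simp [hx])
    cases t with
    | nil => simp [aGo, hc]
    | cons d t' =>
      have := ih rest PySem.Set.empty (by simp) ht
      simp [aGo, hc] at this ⊢
      exact this

-- the first element dropWhile leaves fails the predicate
theorem dropWhile_head_false {α : Type} (p : α → Bool) (r : α) (rt : List α) :
    ∀ l : List α, l.dropWhile p = r :: rt → p r = false := by
  intro l
  induction l with
  | nil => simp [List.dropWhile]
  | cons x xs ih =>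
    intro h
    by_cases hx : p x = true
    · exact ih (by simpa [List.dropWhile, hx] using h)
    · simp [List.dropWhile, hx] at h
      rw [← h.1]
      simpa using hx

theorem aGo_eq_runsGo : ∀ l : List Char, aGo l PySem.Set.empty = runsGo l
  | [] => by simp [aGo, runsGo]
  | c :: t => by
    have hdrop : (c :: t).dropWhile (fun x => is_consonant x == is_consonant c)
        = t.dropWhile (fun x => is_consonant x == is_consonant c) := by
      simp [List.dropWhile]
    have htake : (c :: t).takeWhile (fun x => is_consonant x == is_consonant c)
        = c :: t.takeWhile (fun x => is_consonant x == is_consonant c) := by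
      simp [List.takeWhile]
    have hsplit :
        (c :: t).takeWhile (fun x => is_consonant x == is_consonant c) ++
        (c :: t).dropWhile (fun x => is_consonant x == is_consonant c) = c :: t :=
      List.takeWhile_append_dropWhile
    have hrun_mem : ∀ x ∈ (c :: t).takeWhile (fun x => is_consonant x == is_consonant c),
        is_consonant x = is_consonant c := by
      intro x hx
      simpa using List.mem_takeWhile_imp (p := fun x => is_consonant x == is_consonant c) hx
    have ih : aGo (t.dropWhile (fun x => is_consonant x == is_consonant c)) PySem.Set.empty
        = runsGo (t.dropWhile (fun x => is_consonant x == is_consonant c)) :=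
      aGo_eq_runsGo (t.dropWhile (fun x => is_consonant x == is_consonant c))
    rw [runsGo.eq_def]
    simp only []
    conv_lhs => rw [← hsplit]
    by_cases hk : is_consonant c = true
    · -- consonant run: A dedups it exactly like B, then the seen-set dies at the run border
      obtain ⟨s', hs'⟩ := aGo_cons_run
        ((c :: t).takeWhile (fun x => is_consonant x == is_consonant c))
        ((c :: t).dropWhile (fun x => is_consonant x == is_consonant c))
        PySem.Set.empty (fun x hx => (hrun_mem x hx).trans hk)
      rw [hs', if_pos hk]
      congr 1
      rw [hdrop] at *
      cases hr : t.dropWhile (fun x => is_consonant x == is_consonant c) with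
      | nil => simp [aGo, runsGo]
      | cons r rt =>
        have hrf : is_consonant r = false := by
          have h := dropWhile_head_false (fun x => is_consonant x == is_consonant c) r rt t hr
          simp [hk] at h
          exact h
        rw [aGo_clear r rt s' PySem.Set.empty hrf]
        rw [hr] at ih
        exact ih
    · -- non-consonant run: A copies it and clears its seen-set
      have hkf : is_consonant c = false := by
        cases hb : is_consonant c
        · rfl
        · exact absurd hb hk
      have hne : (c :: t).takeWhile (fun x => is_consonant x == is_consonant c) ≠ [] := by
        rw [htake]; simp
      rw [aGo_noncons_run _ _ PySem.Set.empty hne (fun x hx => (hrun_mem x hx).trans hkf)]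
      rw [if_neg hk, hdrop, ih]
termination_by l => l.length
decreasing_by
  exact Nat.lt_succ_of_le (List.length_dropWhile_le _ _)

-- ===== VERDICT (by name: the statement is the Claim_ definition above) =====
theorem reverse_referer_spec : Claim_equal_reverse_referer := by
  intro word _
  unfold Spec_reverse_referer reverse_referer reverse_referer_alt
  rw [foldl_eq_aGo, aGo_eq_runsGo]
  simp
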